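-- pv_equiv track=rewrite | github.com/AliBnh/CompliTrace | apps/orchestration-service/app/services/audit_runner.py | _coverage_to_support_valid
-- ===== SOURCE A (Python) =====
-- SYSTEMIC_REQUIRED_OBLIGATION_KEYS: dict[str, str] = {
--     "missing_controller_identity": "controller_identity_present",
--     "missing_controller_contact": "controller_contact_present",
--     "missing_legal_basis": "legal_basis_present",
--     "missing_retention_period": "retention_present",
--     "missing_rights_notice": "rights_present",
--     "missing_complaint_right": "complaint_present",
-- }
--
-- def _coverage_to_support_valid(issue_id: str, refs: list[str], obligation_map: dict[str, bool], anchors: list[str]) -> bool: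
--     if not anchors or not refs:
--         return False
--     has_processing_evidence = any(r.startswith("section:") for r in refs)
--     if not has_processing_evidence:
--         return False
--     required_key = SYSTEMIC_REQUIRED_OBLIGATION_KEYS.get(issue_id)
--     if issue_id == "missing_controller_identity":
--         identity_missing = obligation_map.get("controller_identity_present") is False
--         contact_missing = obligation_map.get("controller_contact_present") is False
--         if not (identity_missing or contact_missing):
--             return False
--     elif required_key and obligation_map.get(required_key) is not False:
--         return False
--     return True
-- ===== SOURCE B (Python) =====
-- _NEEDED = {
--     "missing_controller_identity": frozenset({"controller_identity_present", "controller_contact_present"}),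
--     "missing_controller_contact": frozenset({"controller_contact_present"}),
--     "missing_legal_basis": frozenset({"legal_basis_present"}),
--     "missing_retention_period": frozenset({"retention_present"}),
--     "missing_rights_notice": frozenset({"rights_present"}),
--     "missing_complaint_right": frozenset({"complaint_present"}),
-- }
--
-- def _coverage_to_support_valid(issue_id, refs, obligation_map, anchors):
--     if not (anchors and any(r.startswith("section:") for r in refs)):
--         return False
--     falsified = {k for k, v in obligation_map.items() if v is False}
--     needed = _NEEDED.get(issue_id)
--     return needed is None or not falsified.isdisjoint(needed)
-- ===== Notes on version B (the rewrite author's own statement) =====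
-- stated objective: simpler
-- what changed: Instead of A's if/elif chain doing per-key dict point lookups (a dedicated two-key OR branch plus a string-valued table probed with get), B scans the obligation map once collecting the explicitly-False keys into a set and decides by a single set-disjointness test against a static issue_id -> frozenset-of-required-keys table, with the two leading guards merged into one condition.
import Mathlib
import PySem

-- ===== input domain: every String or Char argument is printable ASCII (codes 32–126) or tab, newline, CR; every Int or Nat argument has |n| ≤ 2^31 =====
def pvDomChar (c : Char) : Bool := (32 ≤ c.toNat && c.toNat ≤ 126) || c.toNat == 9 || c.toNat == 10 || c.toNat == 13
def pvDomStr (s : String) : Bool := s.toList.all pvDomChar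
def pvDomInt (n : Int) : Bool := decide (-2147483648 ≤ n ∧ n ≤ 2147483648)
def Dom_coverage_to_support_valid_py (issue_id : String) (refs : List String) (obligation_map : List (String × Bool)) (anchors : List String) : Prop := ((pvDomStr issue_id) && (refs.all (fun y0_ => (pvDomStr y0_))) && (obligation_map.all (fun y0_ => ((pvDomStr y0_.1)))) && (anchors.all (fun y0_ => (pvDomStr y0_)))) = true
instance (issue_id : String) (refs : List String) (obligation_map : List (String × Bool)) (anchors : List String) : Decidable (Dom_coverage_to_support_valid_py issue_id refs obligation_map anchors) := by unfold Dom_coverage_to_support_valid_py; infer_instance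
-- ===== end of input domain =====

-- B replaces A's per-key dict lookups and if/elif chain by one pass collecting the explicitly-False
-- obligation keys into a set tested for disjointness against a static required-keys table (objective: simpler).


-- ===== PORT A =====
-- module-level constant SYSTEMIC_REQUIRED_OBLIGATION_KEYS
def systemicRequiredObligationKeys : PySem.Dict String String := PySem.Dict.mk
  [("missing_controller_identity", "controller_identity_present"),
   ("missing_controller_contact", "controller_contact_present"),
   ("missing_legal_basis", "legal_basis_present"),
   ("missing_retention_period", "retention_present"),
   ("missing_rights_notice", "rights_present"),
   ("missing_complaint_right", "complaint_present")]

def coverage_to_support_valid_py (issue_id : String) (refs : List String) (obligation_map : List (String × Bool)) (anchors : List String) : Bool :=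
  if anchors.isEmpty || refs.isEmpty then false
  else
    let has_processing_evidence := refs.any (fun r => PySem.Str.startswith r "section:")
    if !has_processing_evidence then false
    else
      let required_key := systemicRequiredObligationKeys.get? issue_id
      if issue_id == "missing_controller_identity" then
        let identity_missing := (PySem.Dict.mk obligation_map).get? "controller_identity_present" == some false
        let contact_missing := (PySem.Dict.mk obligation_map).get? "controller_contact_present" == some false
        if !(identity_missing || contact_missing) then false else true
      else
        -- 'required_key and … is not False': a str is truthy iff nonempty
        if (match required_key with
            | some k => (k != "") && ((PySem.Dict.mk obligation_map).get? k != some false)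
            | none => false) then false
        else true

-- ===== PORT B =====
-- static table _NEEDED: issue_id -> set of obligation keys whose explicit False supports the issue
def neededTable : PySem.Dict String (PySem.Set String) := PySem.Dict.mk
  [("missing_controller_identity", PySem.Set.ofList ["controller_identity_present", "controller_contact_present"]),
   ("missing_controller_contact", PySem.Set.ofList ["controller_contact_present"]),
   ("missing_legal_basis", PySem.Set.ofList ["legal_basis_present"]),
   ("missing_retention_period", PySem.Set.ofList ["retention_present"]),
   ("missing_rights_notice", PySem.Set.ofList ["rights_present"]),
   ("missing_complaint_right", PySem.Set.ofList ["complaint_present"])]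

def coverage_to_support_valid_py_alt (issue_id : String) (refs : List String) (obligation_map : List (String × Bool)) (anchors : List String) : Bool :=
  if !(!anchors.isEmpty && refs.any (fun r => PySem.Str.startswith r "section:")) then false
  else
    let falsified : PySem.Set String :=
      PySem.Set.ofList ((obligation_map.filter (fun kv => !kv.2)).map Prod.fst)
    match neededTable.get? issue_id with
    | none => true
    | some needed => !(PySem.Set.isdisjoint falsified needed)

-- ===== PRECONDITION & SPEC =====
-- Pre_ excludes association lists with duplicate keys, which represent no Python dict
-- (the Python argument is a dict, whose keys are always unique).
def Pre_coverage_to_support_valid_py (issue_id : String) (refs : List String) (obligation_map : List (String × Bool)) (anchors : List String) : Prop :=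
  (obligation_map.map Prod.fst).Nodup
instance (issue_id : String) (refs : List String) (obligation_map : List (String × Bool)) (anchors : List String) : Decidable (Pre_coverage_to_support_valid_py issue_id refs obligation_map anchors) := by unfold Pre_coverage_to_support_valid_py; infer_instance

def pvWitness_coverage_to_support_valid_py : String × List String × (List (String × Bool)) × List String :=
  ("missing_legal_basis", ["section:1"], [("legal_basis_present", false)], ["a1"])

def Spec_coverage_to_support_valid_py (issue_id : String) (refs : List String) (obligation_map : List (String × Bool)) (anchors : List String) (out : Bool) : Prop := out = coverage_to_support_valid_py_alt issue_id refs obligation_map anchors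
instance (issue_id : String) (refs : List String) (obligation_map : List (String × Bool)) (anchors : List String) (out : Bool) : Decidable (Spec_coverage_to_support_valid_py issue_id refs obligation_map anchors out) := by unfold Spec_coverage_to_support_valid_py; infer_instance

-- ===== CLAIM =====
def Claim_equal_coverage_to_support_valid_py : Prop := ∀ (issue_id : String) (refs : List String) (obligation_map : List (String × Bool)) (anchors : List String), Dom_coverage_to_support_valid_py issue_id refs obligation_map anchors → Pre_coverage_to_support_valid_py issue_id refs obligation_map anchors → Spec_coverage_to_support_valid_py issue_id refs obligation_map anchors (coverage_to_support_valid_py issue_id refs obligation_map anchors)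

-- ===== LEMMAS AND PROOFS =====
-- a key is in B's falsified set iff its first binding in the map is False (unique keys)
theorem pv_mem_falsified (m : List (String × Bool)) (hn : (m.map Prod.fst).Nodup) (k : String) :
    (k ∈ (m.filter (fun kv => !kv.2)).map Prod.fst) ↔ (PySem.Dict.mk m).get? k = some false := by
  induction m with
  | nil => simp [PySem.Dict.get?]
  | cons p rest ih =>
    obtain ⟨k₀, v₀⟩ := p
    simp only [List.map_cons, List.nodup_cons] at hn
    rw [PySem.Dict.get?_mk_cons]
    cases v₀ with
    | true =>
      by_cases hk : k₀ = k
      · subst hk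
        have hnk : k₀ ∉ (rest.filter (fun kv => !kv.2)).map Prod.fst := by
          intro hmem
          rcases List.mem_map.mp hmem with ⟨kv, hkv, hfst⟩
          exact hn.1 (List.mem_map.mpr ⟨kv, List.mem_of_mem_filter hkv, hfst⟩)
        simp [List.filter_cons, hnk]
      · simp [List.filter_cons, show (k₀ == k) = false by simp [hk], ih hn.2]
    | false =>
      by_cases hk : k₀ = k
      · subst hk
        simp [List.filter_cons]
      · simp [List.filter_cons, show (k₀ == k) = false by simp [hk], Ne.symm hk, ih hn.2]

-- B's non-disjointness test over a needed list = an any-scan of A-style first-match lookups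
theorem pv_not_disjoint (m : List (String × Bool)) (hn : (m.map Prod.fst).Nodup) (needed : List String) :
    (!(PySem.Set.isdisjoint (PySem.Set.ofList ((m.filter (fun kv => !kv.2)).map Prod.fst)) needed))
      = needed.any (fun k => (PySem.Dict.mk m).get? k == some false) := by
  have key : ∀ x, x ∈ PySem.Set.ofList ((m.filter (fun kv => !kv.2)).map Prod.fst)
      ↔ (PySem.Dict.mk m).get? x = some false := by
    intro x
    rw [PySem.Set.mem_ofList]
    exact pv_mem_falsified m hn x
  cases hd : PySem.Set.isdisjoint (PySem.Set.ofList ((m.filter (fun kv => !kv.2)).map Prod.fst)) needed with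
  | false =>
    have hnot : ¬ ∀ x ∈ PySem.Set.ofList ((m.filter (fun kv => !kv.2)).map Prod.fst), x ∉ needed := by
      rw [← PySem.Set.isdisjoint_iff]
      simp [hd]
    push Not at hnot
    obtain ⟨x, hxS, hxn⟩ := hnot
    symm
    simp only [Bool.not_false]
    rw [List.any_eq_true]
    exact ⟨x, hxn, by simp [(key x).mp hxS]⟩
  | true =>
    have hall := (PySem.Set.isdisjoint_iff _ _).mp hd
    symm
    simp only [Bool.not_true]
    rw [List.any_eq_false]
    intro k hk hfalse
    exact hall k ((key k).mpr (by simpa using hfalse)) hk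

theorem pv_beq_some_false (o : Option Bool) : (o == some false) = decide (o = some false) := by
  rcases o with _ | b
  · rfl
  · cases b <;> rfl

-- on the table's literal key lists (duplicate-free) set(...) is the list itself
theorem pv_ofList_lit (xs : List String) (h : xs.Nodup) : PySem.Set.ofList xs = xs :=
  PySem.Set.ofList_eq_self_of_nodup xs h

-- ===== VERDICT =====
theorem coverage_to_support_valid_py_spec : Claim_equal_coverage_to_support_valid_py := by
  intro issue_id refs obligation_map anchors _dom hpre
  unfold Spec_coverage_to_support_valid_py coverage_to_support_valid_py coverage_to_support_valid_py_alt
  by_cases ha : anchors.isEmpty = true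
  · simp [ha]
  · have ha' : anchors.isEmpty = false := by simpa using ha
    cases hh : refs.any (fun r => PySem.Str.startswith r "section:") with
    | false =>
      have hr' : (anchors.isEmpty || refs.isEmpty) = refs.isEmpty := by simp [ha']
      by_cases hre : refs.isEmpty = true
      · simp [hr', hre, ha', hh]
      · simp [hr', ha', hh, hre]
    | true =>
      have hre : refs.isEmpty = false := by
        cases hhe : refs.isEmpty
        · rfl
        · rw [List.isEmpty_iff] at hhe; subst hhe; simp at hh
      have hnd := pv_not_disjoint obligation_map hpre
      by_cases e1 : issue_id = "missing_controller_identity"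
      · subst e1
        simp [ha', hre, hh, systemicRequiredObligationKeys, neededTable,
              PySem.Dict.get?_mk_cons, hnd, pv_beq_some_false, pv_ofList_lit]
      · by_cases e2 : issue_id = "missing_controller_contact"
        · subst e2
          simp [ha', hre, hh, systemicRequiredObligationKeys, neededTable,
                PySem.Dict.get?_mk_cons, hnd, pv_beq_some_false, pv_ofList_lit]
        · by_cases e3 : issue_id = "missing_legal_basis"
          · subst e3
            simp [ha', hre, hh, systemicRequiredObligationKeys, neededTable,
                  PySem.Dict.get?_mk_cons, hnd, pv_beq_some_false, pv_ofList_lit]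
          · by_cases e4 : issue_id = "missing_retention_period"
            · subst e4
              simp [ha', hre, hh, systemicRequiredObligationKeys, neededTable,
                    PySem.Dict.get?_mk_cons, hnd, pv_beq_some_false, pv_ofList_lit]
            · by_cases e5 : issue_id = "missing_rights_notice"
              · subst e5
                simp [ha', hre, hh, systemicRequiredObligationKeys, neededTable,
                      PySem.Dict.get?_mk_cons, hnd, pv_beq_some_false, pv_ofList_lit]
              · by_cases e6 : issue_id = "missing_complaint_right"
                · subst e6
                  simp [ha', hre, hh, systemicRequiredObligationKeys, neededTable,
                        PySem.Dict.get?_mk_cons, hnd, pv_beq_some_false, pv_ofList_lit]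
                · have f1 : ¬("missing_controller_identity" = issue_id) := fun h => e1 h.symm
                  have f2 : ¬("missing_controller_contact" = issue_id) := fun h => e2 h.symm
                  have f3 : ¬("missing_legal_basis" = issue_id) := fun h => e3 h.symm
                  have f4 : ¬("missing_retention_period" = issue_id) := fun h => e4 h.symm
                  have f5 : ¬("missing_rights_notice" = issue_id) := fun h => e5 h.symm
                  have f6 : ¬("missing_complaint_right" = issue_id) := fun h => e6 h.symm
                  simp [ha', hre, hh, e1, systemicRequiredObligationKeys, neededTable,
                        PySem.Dict.get?_mk_cons, PySem.Dict.get?, f1, f2, f3, f4, f5, f6]
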